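-- pv_equiv track=rewrite | github.com/ramazannbilen/python-exercise | edabit/03-medium/Next-Number-Greater-Than-A-and-B-and-Divisible-by-B.py | divisible_by_b
-- ===== SOURCE A (Python) =====
-- def divisible_by_b(a, b):
--     n = 1
--     x = 0
--     while x == 0:
--         if (a + n) % b == 0:
--             x = 1
--             return a + n
--         else:
--             n += 1
-- ===== SOURCE B (Python) =====
-- def divisible_by_b(a, b):
--     d = abs(b)
--     return a + d - a % d
-- ===== Notes on version B (the rewrite author's own statement) =====
-- stated objective: faster
-- what changed: Replaced the trial loop that increments n until (a+n)%b==0 by the closed-form a + |b| - a%|b| (next multiple of b above a).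
import Mathlib
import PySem

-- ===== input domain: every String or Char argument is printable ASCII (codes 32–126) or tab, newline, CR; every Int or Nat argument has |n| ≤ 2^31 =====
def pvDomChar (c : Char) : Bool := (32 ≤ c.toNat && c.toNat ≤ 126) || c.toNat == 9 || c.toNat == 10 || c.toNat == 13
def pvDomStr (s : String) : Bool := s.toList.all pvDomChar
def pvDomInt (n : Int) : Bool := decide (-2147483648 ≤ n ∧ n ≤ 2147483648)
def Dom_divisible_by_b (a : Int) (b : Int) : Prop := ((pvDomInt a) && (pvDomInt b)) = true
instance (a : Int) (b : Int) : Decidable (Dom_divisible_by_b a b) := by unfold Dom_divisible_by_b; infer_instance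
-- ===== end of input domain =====

-- B replaces A's O(|b|) trial loop by the closed-form a + |b| - a % |b| (O(1)); A and B both raise on b = 0, excluded by Pre_.


-- ===== PORT A =====
-- the while loop, made total with fuel |b| (never exhausted when b ≠ 0; the fuel-out
-- value a + n is never reached under Pre_)
def divLoop (a b : Int) : Nat → Int → Int
  | 0, n => a + n
  | fuel + 1, n => if PySem.Int.mod (a + n) b = 0 then a + n else divLoop a b fuel (n + 1)

def divisible_by_b (a : Int) (b : Int) : Int := divLoop a b b.natAbs 1

-- ===== PORT B =====
def divisible_by_b_alt (a : Int) (b : Int) : Int :=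
  let d := |b|
  a + d - PySem.Int.mod a d

-- ===== PRECONDITION & SPEC =====
-- Pre_ excludes exactly b = 0, where Python A raises ZeroDivisionError (B raises too).
def Pre_divisible_by_b (a : Int) (b : Int) : Prop := b ≠ 0
instance (a : Int) (b : Int) : Decidable (Pre_divisible_by_b a b) := by unfold Pre_divisible_by_b; infer_instance
def pvWitness_divisible_by_b : Int × Int := (10, 3)

def Spec_divisible_by_b (a : Int) (b : Int) (out : Int) : Prop := out = divisible_by_b_alt a b
instance (a : Int) (b : Int) (out : Int) : Decidable (Spec_divisible_by_b a b out) := by unfold Spec_divisible_by_b; infer_instance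

-- ===== CLAIM (what is proved, stated in full; the proofs are below) =====
def Claim_equal_divisible_by_b : Prop := ∀ (a : Int) (b : Int), Dom_divisible_by_b a b → Pre_divisible_by_b a b → Spec_divisible_by_b a b (divisible_by_b a b)

-- ===== LEMMAS AND PROOFS =====

-- invariant of A's loop: with r = a % |b| and enough fuel, the loop stops exactly at n = |b| - r
theorem divLoop_eq (a b : Int) (hb : b ≠ 0) :
    ∀ (fuel : Nat) (n : Int), 1 ≤ n → n ≤ |b| - PySem.Int.mod a |b| →
      (|b| - PySem.Int.mod a |b| - n).toNat < fuel →
      divLoop a b fuel n = a + (|b| - PySem.Int.mod a |b|) := by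
  set d := |b| with hd
  have hdpos : 0 < d := abs_pos.mpr hb
  have hr : PySem.Int.mod a d = a % d := PySem.Int.mod_eq_emod_of_pos hdpos
  have hr0 : 0 ≤ a % d := Int.emod_nonneg a (by omega)
  have hrd : a % d < d := Int.emod_lt_of_pos a hdpos
  have hdvd : d ∣ (a - a % d) := ⟨a / d, by have := Int.mul_ediv_add_emod a d; linarith⟩
  intro fuel
  induction fuel with
  | zero => intro n h1 h2 h3; omega
  | succ fuel ih =>
    intro n h1 h2 h3
    rw [hr] at h2 h3 ⊢
    have hiff : (PySem.Int.mod (a + n) b = 0) ↔ d ∣ (a % d + n) := by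
      rw [PySem.Int.mod_eq_zero_iff_dvd, ← abs_dvd, ← hd]
      have : a + n = (a - a % d) + (a % d + n) := by ring
      rw [this, dvd_add_right hdvd]
    simp only [divLoop]
    by_cases hstop : n = d - a % d
    · have : PySem.Int.mod (a + n) b = 0 := by
        rw [hiff, hstop]; exact ⟨1, by ring⟩
      rw [if_pos this, hstop]
    · have hlt : n < d - a % d := by omega
      have : ¬ PySem.Int.mod (a + n) b = 0 := by
        rw [hiff]
        intro hdv
        have hpos : 0 < a % d + n := by omega
        have := Int.le_of_dvd hpos hdv
        omega
      rw [if_neg this]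
      have := ih (n + 1) (by omega) (by rw [hr]; omega) (by rw [hr]; omega)
      rw [hr] at this
      exact this

-- ===== VERDICT (by name: the statement is the Claim_ definition above) =====
theorem divisible_by_b_spec : Claim_equal_divisible_by_b := by
  intro a b _ hb
  unfold Spec_divisible_by_b divisible_by_b divisible_by_b_alt
  have hdpos : (0:Int) < |b| := abs_pos.mpr hb
  have hr : PySem.Int.mod a |b| = a % |b| := PySem.Int.mod_eq_emod_of_pos hdpos
  have hr0 : 0 ≤ a % |b| := Int.emod_nonneg a (by omega)
  have hrd : a % |b| < |b| := Int.emod_lt_of_pos a hdpos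
  have hfuel : (|b| - PySem.Int.mod a |b| - 1).toNat < b.natAbs := by
    rw [hr]
    have : |b| = (b.natAbs : Int) := (Int.abs_eq_natAbs b)
    omega
  rw [divLoop_eq a b hb b.natAbs 1 le_rfl (by rw [hr]; omega) hfuel]
  ring
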